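-- pv_equiv track=rewrite | github.com/NunoMCSilva/My-Advent-of-Code-2017-Solutions | solutions/day9/solver1.py | prune_garbage
-- ===== SOURCE A (Python) =====
-- def prune_garbage(stream):
--     ignore_flag = False
--     for char in stream:
--         if ignore_flag:
--             if char == '>':
--                 ignore_flag = False
--                 continue
--         else:
--             if char == '<':
--                 ignore_flag = True
--                 continue
--             else:
--                 yield char
-- ===== SOURCE B (Python) =====
-- def prune_garbage(stream):
--     it = iter(stream)
--     for char in it:
--         if char == '<':
--             for c in it:
--                 if c == '>':
--                     break
--         else:
--             yield char
-- ===== Notes on version B (the rewrite author's own statement) =====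
-- stated objective: simpler
-- what changed: Replaces the ignore_flag-driven flat state machine with a nested loop over one shared iterator: on an opening delimiter an inner loop consumes the garbage through its closing delimiter inline, eliminating the boolean state.
import Mathlib
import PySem

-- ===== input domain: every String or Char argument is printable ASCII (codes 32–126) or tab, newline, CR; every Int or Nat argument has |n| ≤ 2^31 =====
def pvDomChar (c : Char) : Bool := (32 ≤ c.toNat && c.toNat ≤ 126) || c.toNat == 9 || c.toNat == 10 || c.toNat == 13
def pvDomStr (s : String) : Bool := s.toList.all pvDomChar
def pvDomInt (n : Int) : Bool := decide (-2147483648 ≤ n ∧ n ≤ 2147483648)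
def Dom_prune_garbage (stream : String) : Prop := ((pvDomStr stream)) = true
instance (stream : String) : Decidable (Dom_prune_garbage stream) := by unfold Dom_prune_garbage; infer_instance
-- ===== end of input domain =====

-- ===== PORT A =====
-- A: flag-driven state machine over the stream, yielding non-garbage characters.
def pruneA_loop : Bool → List Char → List String
  | _, [] => []
  | true, c :: rest =>
      if c = '>' then pruneA_loop false rest
      else pruneA_loop true rest
  | false, c :: rest =>
      if c = '<' then pruneA_loop true rest
      else String.mk [c] :: pruneA_loop false rest

def prune_garbage (stream : String) : List String :=
  pruneA_loop false stream.toList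

-- ===== PORT B =====
-- B: nested loops over one shared iterator; the inner loop consumes garbage through the closing delimiter.
mutual
def pruneB_outer : List Char → List String
  | [] => []
  | c :: it =>
      if c = '<' then pruneB_inner it
      else String.mk [c] :: pruneB_outer it

def pruneB_inner : List Char → List String
  | [] => []
  | c :: it =>
      if c = '>' then pruneB_outer it
      else pruneB_inner it
end

def prune_garbage_alt (stream : String) : List String :=
  pruneB_outer stream.toList

-- ===== PRECONDITION & SPEC =====
def Spec_prune_garbage (stream : String) (out : List String) : Prop := out = prune_garbage_alt stream
instance (stream : String) (out : List String) : Decidable (Spec_prune_garbage stream out) := by unfold Spec_prune_garbage; infer_instance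

-- ===== CLAIM (what is proved, stated in full; the proofs are below) =====
def Claim_equal_prune_garbage : Prop := ∀ (stream : String), Dom_prune_garbage stream → Spec_prune_garbage stream (prune_garbage stream)

-- ===== LEMMAS AND PROOFS =====
theorem pruneA_loop_eq (l : List Char) :
    ∀ flag : Bool, pruneA_loop flag l = (if flag then pruneB_inner l else pruneB_outer l) := by
  induction l with
  | nil => intro flag; cases flag <;> simp [pruneA_loop, pruneB_outer, pruneB_inner]
  | cons c rest ih =>
      intro flag
      cases flag <;> simp only [pruneA_loop, pruneB_outer, pruneB_inner] <;> split_ifs <;> simp_all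

-- ===== VERDICT (by name: the statement is the Claim_ definition above) =====
theorem prune_garbage_spec : Claim_equal_prune_garbage := by
  intro stream _
  unfold Spec_prune_garbage prune_garbage prune_garbage_alt
  simpa using pruneA_loop_eq stream.toList false
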